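-- pv_equiv track=rewrite | github.com/Cuddles-Yu/ntub-coding | 專案檔案/地圖資訊爬蟲/ckip/module/functions.py | combine_by_pattern
-- ===== SOURCE A (Python) =====
-- def combine_by_pattern(word_list, pos_list, pattern):
--     combined_words = []
--     combined_pos = []
--     pattern_length = len(pattern)
--     i = 0
--     while i < len(word_list):
--         if i + pattern_length <= len(word_list) and pos_list[i:i + pattern_length] == pattern:
--             combined_word = ''.join(word_list[i:i + pattern_length])
--             combined_words.append(combined_word)
--             combined_pos.append(pattern[0])
--             i += pattern_length
--         else:
--             combined_words.append(word_list[i])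
--             combined_pos.append(pos_list[i])
--             i += 1
--     return combined_words, combined_pos
-- ===== SOURCE B (Python) =====
-- def combine_by_pattern(word_list, pos_list, pattern):
--     # Two-phase rewrite: first collect the greedy non-overlapping match start
--     # positions, then stitch the output lists from whole slices between matches.
--     m = len(pattern)
--     n = len(word_list)
--     starts = []
--     if m:
--         i = 0
--         while i <= n - m:
--             if pos_list[i:i + m] == pattern:
--                 starts.append(i)
--                 i += m
--             else:
--                 i += 1
--     out_w, out_p, prev = [], [], 0
--     for s in starts:
--         out_w += word_list[prev:s]
--         out_p += pos_list[prev:s]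
--         out_w.append(''.join(word_list[s:s + m]))
--         out_p.append(pattern[0])
--         prev = s + m
--     out_w += word_list[prev:n]
--     out_p += pos_list[prev:n]
--     return out_w, out_p
-- ===== Notes on version B (the rewrite author's own statement) =====
-- stated objective: alternative
-- what changed: B splits A's single while-loop into two phases: a scan that only collects the greedy non-overlapping match start indices, then a stitching pass that rebuilds both output lists from whole slices between matches; A interleaves matching and output construction element by element.
import Mathlib
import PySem

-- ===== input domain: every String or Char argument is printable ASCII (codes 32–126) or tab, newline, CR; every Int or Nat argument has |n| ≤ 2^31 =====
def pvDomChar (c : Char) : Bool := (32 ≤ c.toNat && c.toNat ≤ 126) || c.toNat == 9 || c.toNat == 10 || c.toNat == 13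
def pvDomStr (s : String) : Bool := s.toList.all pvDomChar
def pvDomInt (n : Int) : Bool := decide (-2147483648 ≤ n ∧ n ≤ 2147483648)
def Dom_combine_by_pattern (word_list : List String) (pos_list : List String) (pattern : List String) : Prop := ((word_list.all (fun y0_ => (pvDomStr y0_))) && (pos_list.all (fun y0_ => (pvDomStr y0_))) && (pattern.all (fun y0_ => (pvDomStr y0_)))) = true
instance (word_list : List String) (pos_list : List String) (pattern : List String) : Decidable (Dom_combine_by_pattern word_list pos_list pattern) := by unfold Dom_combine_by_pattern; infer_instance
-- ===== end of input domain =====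

-- B rebuilds the result in two phases (collect match starts, then stitch slices) instead of A's
-- interleaved while-loop; same cost, different decomposition (objective: alternative).


-- ===== PORT A =====
-- A's while-loop: i walks the word list, appending either the merged match or the single element.
def goA (word_list pos_list pattern : List String) (i : Nat) (accW accP : List String) :
    List String × List String :=
  if _h : i < word_list.length then
    if i + pattern.length ≤ word_list.length ∧
        PySem.List.slice pos_list (some (i : Int)) (some ((i : Int) + (pattern.length : Int))) = pattern then
      match _hpat : pattern with
      | [] => (accW, accP)   -- Python raises IndexError at pattern[0]; excluded by Pre_
      | p0 :: _rest =>
        goA word_list pos_list pattern (i + pattern.length)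
          (accW ++ [PySem.Str.join ""
            (PySem.List.slice word_list (some (i : Int)) (some ((i : Int) + (pattern.length : Int))))])
          (accP ++ [p0])
    else
      goA word_list pos_list pattern (i + 1)
        (accW ++ [PySem.List.pyGetD word_list (i : Int) ""])
        (accP ++ [PySem.List.pyGetD pos_list (i : Int) ""])
  else (accW, accP)
termination_by word_list.length - i
decreasing_by all_goals first | omega | (simp_all; omega)

def combine_by_pattern (word_list : List String) (pos_list : List String) (pattern : List String) : List String × List String :=
  goA word_list pos_list pattern 0 [] []

-- ===== PORT B =====
-- Phase 1: the start indices of the greedy non-overlapping matches (Python's `while i <= n - m`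
-- over ints is `i + m ≤ n` here; only called with a nonempty pattern, hence the hypothesis).
def startsB (pos_list pattern : List String) (n : Nat) (i : Nat) (hm : 0 < pattern.length) : List Nat :=
  if _h : i + pattern.length ≤ n then
    if PySem.List.slice pos_list (some (i : Int)) (some ((i : Int) + (pattern.length : Int))) = pattern then
      i :: startsB pos_list pattern n (i + pattern.length) hm
    else
      startsB pos_list pattern n (i + 1) hm
  else []
termination_by n - i
decreasing_by all_goals omega

-- Phase 2: stitch the outputs from the slices between consecutive matches.
-- stepB is the body of B's `for s in starts` loop; state = (out_w, out_p, prev).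
def stepB (word_list pos_list pattern : List String) (st : List String × List String × Nat) (s : Nat) :
    List String × List String × Nat :=
  (st.1 ++ PySem.List.slice word_list (some (st.2.2 : Int)) (some (s : Int))
        ++ [PySem.Str.join "" (PySem.List.slice word_list (some (s : Int)) (some ((s : Int) + (pattern.length : Int))))],
   st.2.1 ++ PySem.List.slice pos_list (some (st.2.2 : Int)) (some (s : Int))
        ++ [pattern.headD ""],   -- pattern[0]: the loop only runs when a match exists, so pattern ≠ []
   s + pattern.length)

-- finishB appends the trailing slices after the last match.
def finishB (word_list pos_list : List String) (n : Nat) (st : List String × List String × Nat) :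
    List String × List String :=
  (st.1 ++ PySem.List.slice word_list (some (st.2.2 : Int)) (some (n : Int)),
   st.2.1 ++ PySem.List.slice pos_list (some (st.2.2 : Int)) (some (n : Int)))

-- Python B: n = len(word_list); starts = phase 1 (empty unless the pattern is nonempty);
-- then the `for s in starts` fold (stepB) and the trailing slices (finishB).
def combine_by_pattern_alt (word_list : List String) (pos_list : List String) (pattern : List String) : List String × List String :=
  finishB word_list pos_list word_list.length
    ((if hm : 0 < pattern.length then startsB pos_list pattern word_list.length 0 hm
      else []).foldl (stepB word_list pos_list pattern) ([], [], 0))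

-- ===== PRECONDITION & SPEC =====
-- Pre_ excludes exactly the inputs where A raises IndexError: an empty pattern with a nonempty
-- word list (pattern[0]), and a pos list shorter than the word list (pos_list[i] at the tail).
def Pre_combine_by_pattern (word_list : List String) (pos_list : List String) (pattern : List String) : Prop :=
  (pattern ≠ [] ∨ word_list = []) ∧ word_list.length ≤ pos_list.length
instance (word_list : List String) (pos_list : List String) (pattern : List String) : Decidable (Pre_combine_by_pattern word_list pos_list pattern) := by unfold Pre_combine_by_pattern; infer_instance

def pvWitness_combine_by_pattern : List String × List String × List String :=
  (["a", "b", "c"], ["N", "V", "N"], ["N", "V"])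

def Spec_combine_by_pattern (word_list : List String) (pos_list : List String) (pattern : List String) (out : List String × List String) : Prop := out = combine_by_pattern_alt word_list pos_list pattern
instance (word_list : List String) (pos_list : List String) (pattern : List String) (out : List String × List String) : Decidable (Spec_combine_by_pattern word_list pos_list pattern out) := by unfold Spec_combine_by_pattern; infer_instance

-- ===== CLAIM (what is proved, stated in full; the proofs are below) =====
def Claim_equal_combine_by_pattern : Prop := ∀ (word_list : List String) (pos_list : List String) (pattern : List String), Dom_combine_by_pattern word_list pos_list pattern → Pre_combine_by_pattern word_list pos_list pattern → Spec_combine_by_pattern word_list pos_list pattern (combine_by_pattern word_list pos_list pattern)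

-- ===== LEMMAS AND PROOFS =====

-- cons-form of A's loop (no accumulators)
def gA (word_list pos_list pattern : List String) (i : Nat) : List String × List String :=
  if _h : i < word_list.length then
    if i + pattern.length ≤ word_list.length ∧
        PySem.List.slice pos_list (some (i : Int)) (some ((i : Int) + (pattern.length : Int))) = pattern then
      match _hpat : pattern with
      | [] => ([], [])
      | p0 :: _rest =>
        let r := gA word_list pos_list pattern (i + pattern.length)
        (PySem.Str.join ""
            (PySem.List.slice word_list (some (i : Int)) (some ((i : Int) + (pattern.length : Int)))) :: r.1,
         p0 :: r.2)
    else
      let r := gA word_list pos_list pattern (i + 1)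
      (PySem.List.pyGetD word_list (i : Int) "" :: r.1,
       PySem.List.pyGetD pos_list (i : Int) "" :: r.2)
  else ([], [])
termination_by word_list.length - i
decreasing_by all_goals first | omega | (simp_all; omega)

-- cons-form of B's stitching pass
def stitch (word_list pos_list pattern : List String) (n : Nat) : List Nat → Nat → List String × List String
  | [], prev => (PySem.List.slice word_list (some (prev : Int)) (some (n : Int)),
                 PySem.List.slice pos_list (some (prev : Int)) (some (n : Int)))
  | s :: rest, prev =>
    let m := pattern.length
    let r := stitch word_list pos_list pattern n rest (s + m)
    (PySem.List.slice word_list (some (prev : Int)) (some (s : Int))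
       ++ PySem.Str.join "" (PySem.List.slice word_list (some (s : Int)) (some ((s : Int) + (m : Int)))) :: r.1,
     PySem.List.slice pos_list (some (prev : Int)) (some (s : Int))
       ++ pattern.headD "" :: r.2)

theorem slice_cons_nat {α : Type} (xs : List α) (i b : Nat) (hi : i < xs.length) (hb : i < b) :
    PySem.List.slice xs (some (i : Int)) (some (b : Int)) =
      xs[i] :: PySem.List.slice xs (some ((i + 1 : Nat) : Int)) (some (b : Int)) := by
  rw [PySem.List.slice_natCast, PySem.List.slice_natCast, List.drop_eq_getElem_cons hi]
  have h : b - i = (b - (i + 1)) + 1 := by omega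
  rw [h, List.take_succ_cons]

theorem goA_acc (word_list pos_list pattern : List String) (i : Nat) (accW accP : List String) :
    goA word_list pos_list pattern i accW accP =
      (accW ++ (gA word_list pos_list pattern i).1, accP ++ (gA word_list pos_list pattern i).2) := by
  fun_induction goA word_list pos_list pattern i accW accP <;> rw [gA.eq_def] <;> (try subst pattern) <;> split_ifs <;> simp_all

theorem startsB_lb (pos_list pattern : List String) (n i : Nat) (hm : 0 < pattern.length) :
    ∀ s ∈ startsB pos_list pattern n i hm, i ≤ s := by
  fun_induction startsB pos_list pattern n i hm with
  | case1 i h hsl ih =>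
      intro s hs
      rcases List.mem_cons.mp hs with rfl | hs
      · exact le_refl s
      · exact le_trans (by omega) (ih s hs)
  | case2 i h hsl ih =>
      intro s hs
      exact le_trans (by omega) (ih s hs)
  | case3 => intro s hs; simp at hs

theorem foldl_stitch (word_list pos_list pattern : List String) (n : Nat)
    (S : List Nat) (ow op : List String) (prev : Nat) :
    finishB word_list pos_list n (S.foldl (stepB word_list pos_list pattern) (ow, op, prev)) =
    (ow ++ (stitch word_list pos_list pattern n S prev).1,
     op ++ (stitch word_list pos_list pattern n S prev).2) := by
  induction S generalizing ow op prev with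
  | nil => simp [finishB, stitch]
  | cons s rest ih =>
      rw [List.foldl_cons]
      simp only [stepB]
      rw [ih]
      simp [stitch, List.append_assoc]

theorem stitch_cons_step (word_list pos_list pattern : List String) (i : Nat)
    (hin : i < word_list.length) (hip : i < pos_list.length) (S : List Nat)
    (hS : ∀ s ∈ S, i + 1 ≤ s) :
    stitch word_list pos_list pattern word_list.length S i =
      (PySem.List.pyGetD word_list (i : Int) "" :: (stitch word_list pos_list pattern word_list.length S (i + 1)).1,
       PySem.List.pyGetD pos_list (i : Int) "" :: (stitch word_list pos_list pattern word_list.length S (i + 1)).2) := by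
  have hgw : PySem.List.pyGetD word_list (i : Int) "" = word_list[i] := by
    simp [PySem.List.pyGetD_natCast, List.getD_eq_getElem?_getD, List.getElem?_eq_getElem hin]
  have hgp : PySem.List.pyGetD pos_list (i : Int) "" = pos_list[i] := by
    simp [PySem.List.pyGetD_natCast, List.getD_eq_getElem?_getD, List.getElem?_eq_getElem hip]
  cases S with
  | nil =>
      simp only [stitch]
      rw [slice_cons_nat word_list i word_list.length hin hin,
          slice_cons_nat pos_list i word_list.length hip hin, hgw, hgp]
  | cons s rest =>
      have hs : i < s := hS s (List.mem_cons_self ..)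
      simp only [stitch]
      rw [slice_cons_nat word_list i s hin hs, slice_cons_nat pos_list i s hip hs, hgw, hgp]
      simp

theorem gA_eq_stitch (word_list pos_list pattern : List String) (i : Nat)
    (hm : 0 < pattern.length) (hlen : word_list.length ≤ pos_list.length) :
    gA word_list pos_list pattern i =
      stitch word_list pos_list pattern word_list.length
        (startsB pos_list pattern word_list.length i hm) i := by
  fun_induction gA word_list pos_list pattern i with
  | case1 i h hcond hpat => exact absurd hm (by simp [hpat])
  | case2 i h hcond p0 rest hpat ih =>
      subst hpat
      rw [startsB, dif_pos hcond.1, if_pos hcond.2]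
      simp only [stitch, ih]
      simp [PySem.List.slice_natCast]
  | case3 i h hcond r ih =>
      have hstarts : startsB pos_list pattern word_list.length i hm =
          startsB pos_list pattern word_list.length (i + 1) hm := by
        rw [startsB]
        by_cases hle : i + pattern.length ≤ word_list.length
        · rw [dif_pos hle, if_neg (fun hsl => hcond ⟨hle, hsl⟩)]
        · rw [dif_neg hle, startsB, dif_neg (by omega)]
      rw [hstarts,
        stitch_cons_step word_list pos_list pattern i h (by omega) _
          (startsB_lb pos_list pattern word_list.length (i + 1) hm), ← ih]
  | case4 i h =>
      rw [startsB, dif_neg (by omega)]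
      simp [stitch, PySem.List.slice_natCast, List.drop_eq_nil_of_le (by omega : word_list.length ≤ i)]
      omega

-- ===== VERDICT (by name: the statement is the Claim_ definition above) =====
theorem combine_by_pattern_spec : Claim_equal_combine_by_pattern := by
  intro word_list pos_list pattern _hdom hpre
  unfold Spec_combine_by_pattern combine_by_pattern combine_by_pattern_alt
  rw [goA_acc]
  by_cases hm : 0 < pattern.length
  · rw [dif_pos hm]
    rw [foldl_stitch word_list pos_list pattern word_list.length _ [] [] 0]
    simp [gA_eq_stitch word_list pos_list pattern 0 hm hpre.2]
  · have hpat : pattern = [] := List.length_eq_zero_iff.mp (by omega)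
    have hw : word_list = [] := hpre.1.resolve_left (fun hne => hne hpat)
    subst hpat; subst hw
    rw [dif_neg hm, gA]
    rfl
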